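-- pv_equiv track=rewrite | github.com/SpectrumQT/WWMI-TOOLS | wwmi-tools/blender_export/blender_export.py | extract_shapekey_data
-- ===== SOURCE A (Python) =====
-- def extract_shapekey_data(loop_data, shapekeys, shapekey_data):
--
--     shapekey_cache = {shapekey_id: {} for shapekey_id, _ in shapekeys}
--
--     for vb_position_id, loop_vertex_data in enumerate(loop_data):
--
--         vertex_id = loop_vertex_data[0]
--
--         vertex_shapekey_data = shapekey_data.get(vertex_id, None)
--         if vertex_shapekey_data is not None:
--             for shapekey_id, vertex_offsets in vertex_shapekey_data.items():
--                 shapekey_cache[shapekey_id][vb_position_id] = vertex_offsets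
--
--     shapekey_offsets = []
--     shapekey_vertex_ids = []
--     shapekey_vertex_offsets = []
--
--     shapekey_verts_count = 0
--     for group_id in range(128):
--
--         shapekey = shapekey_cache.get(group_id, None)
--         if shapekey is None or len(shapekey_cache[group_id]) == 0:
--             shapekey_offsets.extend([shapekey_verts_count if shapekey_verts_count != 0 else 0])
--             continue
--
--         shapekey_offsets.extend([shapekey_verts_count])
--
--         for vertex_id, vertex_offsets in shapekey.items():
--             shapekey_vertex_ids.extend([vertex_id])
--             shapekey_vertex_offsets.extend(vertex_offsets + [0, 0, 0])
--             shapekey_verts_count += 1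
--
--     return shapekey_offsets, shapekey_vertex_ids, shapekey_vertex_offsets
-- ===== SOURCE B (Python) =====
-- def extract_shapekey_data(loop_data, shapekeys, shapekey_data):
--     # Group (vb_position_id, vertex_offsets) pairs per shapekey as plain lists,
--     # then derive the offset table as prefix sums and flatten the groups.
--     groups = {shapekey_id: [] for shapekey_id, _ in shapekeys}
--
--     for vb_position_id, loop_vertex_data in enumerate(loop_data):
--         vertex_shapekey_data = shapekey_data.get(loop_vertex_data[0])
--         if vertex_shapekey_data is not None:
--             for shapekey_id, vertex_offsets in vertex_shapekey_data.items():
--                 groups[shapekey_id].append((vb_position_id, vertex_offsets))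
--
--     sizes = [len(groups.get(g, ())) for g in range(128)]
--     shapekey_offsets = [sum(sizes[:g]) for g in range(128)]
--     shapekey_vertex_ids = [vb for g in range(128) for vb, _ in groups.get(g, ())]
--     shapekey_vertex_offsets = [x for g in range(128)
--                                for _, off in groups.get(g, ())
--                                for x in off + [0, 0, 0]]
--     return shapekey_offsets, shapekey_vertex_ids, shapekey_vertex_offsets
-- ===== Notes on version B (the rewrite author's own statement) =====
-- stated objective: alternative
-- what changed: B groups (position, offsets) pairs per shapekey as plain appended lists instead of nested dicts, then builds the offset table as prefix sums of group sizes and the two flat arrays as separate comprehensions over the groups, replacing A's single stateful counter loop over 128 groups.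
import Mathlib
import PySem

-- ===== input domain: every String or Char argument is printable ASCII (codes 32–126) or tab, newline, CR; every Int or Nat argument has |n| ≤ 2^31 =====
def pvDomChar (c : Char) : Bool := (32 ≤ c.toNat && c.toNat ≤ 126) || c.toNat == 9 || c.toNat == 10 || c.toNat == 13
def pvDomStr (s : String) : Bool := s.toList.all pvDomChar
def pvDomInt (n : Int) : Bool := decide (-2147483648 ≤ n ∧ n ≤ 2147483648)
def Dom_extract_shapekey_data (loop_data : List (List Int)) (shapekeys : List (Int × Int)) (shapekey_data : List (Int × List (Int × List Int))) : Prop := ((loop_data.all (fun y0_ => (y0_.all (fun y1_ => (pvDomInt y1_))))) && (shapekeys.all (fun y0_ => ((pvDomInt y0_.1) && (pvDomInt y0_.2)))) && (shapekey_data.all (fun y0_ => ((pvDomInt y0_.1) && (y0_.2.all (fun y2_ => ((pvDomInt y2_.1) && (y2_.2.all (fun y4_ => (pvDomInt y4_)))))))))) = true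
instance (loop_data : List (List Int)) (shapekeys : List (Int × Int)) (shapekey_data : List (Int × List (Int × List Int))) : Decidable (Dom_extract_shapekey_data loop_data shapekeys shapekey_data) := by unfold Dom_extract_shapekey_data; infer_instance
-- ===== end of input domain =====

-- B reorganises the per-vertex shapekey offsets with per-group appended lists, prefix sums and
-- comprehensions instead of A's nested dicts and single stateful counter loop (objective: alternative).

-- ===== PORT A =====
-- shapekey_cache[shapekey_id][vb_position_id] = vertex_offsets; a missing shapekey_id is a Python
-- KeyError (excluded by Pre_), the port is a no-op there.
def pvCacheStepA (vb : Int) (cache : PySem.Dict Int (PySem.Dict Int (List Int))) (p : Int × List Int) : PySem.Dict Int (PySem.Dict Int (List Int)) :=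
  match cache.get? p.1 with
  | none => cache
  | some inner => cache.insert p.1 (inner.insert vb p.2)

-- one iteration of 'for vb_position_id, loop_vertex_data in enumerate(loop_data)'.
-- loop_vertex_data[0] is an IndexError on an empty row (excluded by Pre_); pyGetD is exact under Pre_.
def pvRowA (shapekey_data : List (Int × List (Int × List Int))) (cache : PySem.Dict Int (PySem.Dict Int (List Int))) (e : Int × List Int) : PySem.Dict Int (PySem.Dict Int (List Int)) :=
  match (PySem.Dict.mk shapekey_data).get? (PySem.List.pyGetD e.2 0 0) with
  | none => cache
  | some vsd => vsd.foldl (pvCacheStepA e.1) cache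

-- body of 'for vertex_id, vertex_offsets in shapekey.items()'; state = (offsets, ids, vertex_offsets, count)
def pvEmitA (st : List Int × List Int × List Int × Int) (p : Int × List Int) : List Int × List Int × List Int × Int :=
  (st.1, st.2.1 ++ [p.1], st.2.2.1 ++ (p.2 ++ [0, 0, 0]), st.2.2.2 + 1)

-- body of 'for group_id in range(128)'
def pvGroupA (cache : PySem.Dict Int (PySem.Dict Int (List Int))) (st : List Int × List Int × List Int × Int) (g : Int) : List Int × List Int × List Int × Int :=
  match cache.get? g with
  | none => (st.1 ++ [if st.2.2.2 ≠ 0 then st.2.2.2 else 0], st.2.1, st.2.2.1, st.2.2.2)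
  | some sk =>
    if sk.size = 0 then (st.1 ++ [if st.2.2.2 ≠ 0 then st.2.2.2 else 0], st.2.1, st.2.2.1, st.2.2.2)
    else sk.items.foldl pvEmitA (st.1 ++ [st.2.2.2], st.2.1, st.2.2.1, st.2.2.2)

def extract_shapekey_data (loop_data : List (List Int)) (shapekeys : List (Int × Int)) (shapekey_data : List (Int × List (Int × List Int))) : List Int × List Int × List Int :=
  let cache0 : PySem.Dict Int (PySem.Dict Int (List Int)) :=
    shapekeys.foldl (fun d p => d.insert p.1 PySem.Dict.empty) PySem.Dict.empty
  let cache := (PySem.List.enumerate loop_data).foldl (pvRowA shapekey_data) cache0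
  let st := (PySem.List.pyRange 0 128 1).foldl (pvGroupA cache) ([], [], [], 0)
  (st.1, st.2.1, st.2.2.1)

-- ===== PORT B =====
-- groups[shapekey_id].append((vb_position_id, vertex_offsets)); missing shapekey_id = KeyError
-- (excluded by Pre_), the port is a no-op there.
def pvGroupStepB (vb : Int) (gs : PySem.Dict Int (List (Int × List Int))) (p : Int × List Int) : PySem.Dict Int (List (Int × List Int)) :=
  match gs.get? p.1 with
  | none => gs
  | some lst => gs.insert p.1 (lst ++ [(vb, p.2)])

-- one iteration of B's enumerate loop; pyGetD is exact under Pre_ (nonempty rows).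
def pvRowB (shapekey_data : List (Int × List (Int × List Int))) (gs : PySem.Dict Int (List (Int × List Int))) (e : Int × List Int) : PySem.Dict Int (List (Int × List Int)) :=
  match (PySem.Dict.mk shapekey_data).get? (PySem.List.pyGetD e.2 0 0) with
  | none => gs
  | some vsd => vsd.foldl (pvGroupStepB e.1) gs

def extract_shapekey_data_alt (loop_data : List (List Int)) (shapekeys : List (Int × Int)) (shapekey_data : List (Int × List (Int × List Int))) : List Int × List Int × List Int :=
  let gs0 : PySem.Dict Int (List (Int × List Int)) :=
    shapekeys.foldl (fun d p => d.insert p.1 ([] : List (Int × List Int))) PySem.Dict.empty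
  let gs := (PySem.List.enumerate loop_data).foldl (pvRowB shapekey_data) gs0
  let sizes := (PySem.List.pyRange 0 128 1).map (fun g => ((gs.getD g []).length : Int))
  let offsets := (PySem.List.pyRange 0 128 1).map (fun g => (PySem.List.slice sizes none (some g)).sum)
  let ids := (PySem.List.pyRange 0 128 1).flatMap (fun g => (gs.getD g []).map (fun p => p.1))
  let packed := (PySem.List.pyRange 0 128 1).flatMap (fun g => (gs.getD g []).flatMap (fun p => p.2 ++ [0, 0, 0]))
  (offsets, ids, packed)

-- ===== PRECONDITION & SPEC =====
-- Pre_ excludes exactly: an empty row of loop_data (Python A raises IndexError on loop_vertex_data[0]);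
-- a referenced vertex whose offsets dict mentions a shapekey id absent from shapekeys (Python A raises
-- KeyError); and duplicate keys inside a per-vertex offsets dict — an artefact of the association-list
-- encoding only, impossible for an actual Python dict, on which overwrite (A) and append (B) differ.
def Pre_extract_shapekey_data (loop_data : List (List Int)) (shapekeys : List (Int × Int)) (shapekey_data : List (Int × List (Int × List Int))) : Prop :=
  (∀ row ∈ loop_data, row ≠ [] ∧
     ∀ p ∈ (((PySem.Dict.mk shapekey_data).get? (PySem.List.pyGetD row 0 0)).getD []),
        p.1 ∈ shapekeys.map Prod.fst) ∧
  (∀ e ∈ shapekey_data, (e.2.map Prod.fst).Nodup)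
instance (loop_data : List (List Int)) (shapekeys : List (Int × Int)) (shapekey_data : List (Int × List (Int × List Int))) : Decidable (Pre_extract_shapekey_data loop_data shapekeys shapekey_data) := by unfold Pre_extract_shapekey_data; infer_instance

def pvWitness_extract_shapekey_data : List (List Int) × (List (Int × Int)) × (List (Int × List (Int × List Int))) :=
  ([[0]], [(1, 0)], [(0, [(1, [1, 2, 3])])])

def Spec_extract_shapekey_data (loop_data : List (List Int)) (shapekeys : List (Int × Int)) (shapekey_data : List (Int × List (Int × List Int))) (out : List Int × List Int × List Int) : Prop := out = extract_shapekey_data_alt loop_data shapekeys shapekey_data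
instance (loop_data : List (List Int)) (shapekeys : List (Int × Int)) (shapekey_data : List (Int × List (Int × List Int))) (out : List Int × List Int × List Int) : Decidable (Spec_extract_shapekey_data loop_data shapekeys shapekey_data out) := by unfold Spec_extract_shapekey_data; infer_instance

-- ===== CLAIM (what is proved, stated in full; the proofs are below) =====
def Claim_equal_extract_shapekey_data : Prop := ∀ (loop_data : List (List Int)) (shapekeys : List (Int × Int)) (shapekey_data : List (Int × List (Int × List Int))), Dom_extract_shapekey_data loop_data shapekeys shapekey_data → Pre_extract_shapekey_data loop_data shapekeys shapekey_data → Spec_extract_shapekey_data loop_data shapekeys shapekey_data (extract_shapekey_data loop_data shapekeys shapekey_data)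

-- ===== LEMMAS AND PROOFS =====

-- A's nested cache and B's group lists stay pointwise related: cache[g] is B's list, as a dict.
def pvRel (cache : PySem.Dict Int (PySem.Dict Int (List Int))) (gs : PySem.Dict Int (List (Int × List Int))) : Prop :=
  ∀ g : Int, cache.get? g = (gs.get? g).map PySem.Dict.mk

-- every vb position recorded so far is < b
def pvBound (b : Int) (gs : PySem.Dict Int (List (Int × List Int))) : Prop :=
  ∀ g lst, gs.get? g = some lst → ∀ q ∈ lst, q.1 < b

lemma pvBound_mono {b b' : Int} (h : b ≤ b') {gs : PySem.Dict Int (List (Int × List Int))} (hb : pvBound b gs) : pvBound b' gs := by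
  intro g lst hg q hq; exact lt_of_lt_of_le (hb g lst hg q hq) h

lemma pv_init (sk : List (Int × Int)) :
    ∀ (cache : PySem.Dict Int (PySem.Dict Int (List Int))) (gs : PySem.Dict Int (List (Int × List Int))),
      pvRel cache gs → (∀ g lst, gs.get? g = some lst → lst = []) →
      pvRel (sk.foldl (fun d p => d.insert p.1 PySem.Dict.empty) cache)
            (sk.foldl (fun d p => d.insert p.1 ([] : List (Int × List Int))) gs) ∧
      (∀ g lst, (sk.foldl (fun d p => d.insert p.1 ([] : List (Int × List Int))) gs).get? g = some lst → lst = []) := by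
  induction sk with
  | nil => intro cache gs h1 h2; exact ⟨h1, h2⟩
  | cons p sk ih =>
    intro cache gs h1 h2
    refine ih _ _ ?_ ?_
    · intro g
      rw [PySem.Dict.get?_insert, PySem.Dict.get?_insert]
      split
      · rfl
      · exact h1 g
    · intro g lst hg
      rw [PySem.Dict.get?_insert] at hg
      split at hg
      · exact (Option.some_inj.mp hg).symm
      · exact h2 g lst hg

-- inserting under a fresh key appends to the items list
lemma pv_mk_insert_fresh (lst : List (Int × List Int)) (s : Int) (v : List Int)
    (h : ∀ q ∈ lst, q.1 ≠ s) :
    (PySem.Dict.mk lst).insert s v = PySem.Dict.mk (lst ++ [(s, v)]) := by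
  have hc : (PySem.Dict.mk lst).contains s = false := by
    rw [PySem.Dict.contains_eq_decide_mem_keys]
    simp only [PySem.Dict.keys_mk, decide_eq_false_iff_not, List.mem_map]
    rintro ⟨q, hq, rfl⟩
    exact h q hq rfl
  apply PySem.Dict.ext
  rw [PySem.Dict.items_insert_of_not_contains]
  exact hc

lemma pv_inner (s : Int) :
    ∀ (vsd : List (Int × List Int)) (cache : PySem.Dict Int (PySem.Dict Int (List Int))) (gs : PySem.Dict Int (List (Int × List Int))),
      (vsd.map Prod.fst).Nodup → pvRel cache gs →
      (∀ g ∈ vsd.map Prod.fst, ∀ lst, gs.get? g = some lst → ∀ q ∈ lst, q.1 ≠ s) →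
      pvBound (s + 1) gs →
      pvRel (vsd.foldl (pvCacheStepA s) cache) (vsd.foldl (pvGroupStepB s) gs) ∧
      pvBound (s + 1) (vsd.foldl (pvGroupStepB s) gs) := by
  intro vsd
  induction vsd with
  | nil => intro cache gs _ h1 _ hb; exact ⟨h1, hb⟩
  | cons p vsd ih =>
    intro cache gs hnd h1 hfr hb
    simp only [List.map_cons, List.nodup_cons] at hnd
    simp only [List.foldl_cons]
    rcases hg : gs.get? p.1 with _ | lst
    · -- missing key: both steps are no-ops
      have hA : pvCacheStepA s cache p = cache := by
        unfold pvCacheStepA; rw [h1 p.1, hg]; rfl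
      have hB : pvGroupStepB s gs p = gs := by
        unfold pvGroupStepB; rw [hg]
      rw [hA, hB]
      exact ih cache gs hnd.2 h1 (fun g hgm => hfr g (by simp [hgm])) hb
    · have hfresh : ∀ q ∈ lst, q.1 ≠ s := hfr p.1 (by simp) lst hg
      have hA : pvCacheStepA s cache p = cache.insert p.1 (PySem.Dict.mk (lst ++ [(s, p.2)])) := by
        unfold pvCacheStepA; rw [h1 p.1, hg]
        simp only [Option.map_some]
        rw [pv_mk_insert_fresh lst s p.2 hfresh]
      have hB : pvGroupStepB s gs p = gs.insert p.1 (lst ++ [(s, p.2)]) := by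
        unfold pvGroupStepB; rw [hg]
      rw [hA, hB]
      refine ih _ _ hnd.2 ?_ ?_ ?_
      · intro g
        rw [PySem.Dict.get?_insert, PySem.Dict.get?_insert]
        split
        · rfl
        · exact h1 g
      · intro g hgm lst' hg' q hq
        rw [PySem.Dict.get?_insert] at hg'
        split at hg'
        · rename_i heq; exact absurd (heq ▸ hgm) hnd.1
        · exact hfr g (by simp [hgm]) lst' hg' q hq
      · intro g lst' hg' q hq
        rw [PySem.Dict.get?_insert] at hg'
        split at hg'
        · cases Option.some_inj.mp hg'
          rcases List.mem_append.mp hq with h | h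
          · exact hb p.1 lst hg q h
          · simp only [List.mem_singleton] at h; subst h; omega
        · exact hb g lst' hg' q hq

lemma pv_outer (skd : List (Int × List (Int × List Int))) (hpre : ∀ e ∈ skd, (e.2.map Prod.fst).Nodup) :
    ∀ (ld : List (List Int)) (s : Int) (cache : PySem.Dict Int (PySem.Dict Int (List Int))) (gs : PySem.Dict Int (List (Int × List Int))),
      pvRel cache gs → pvBound s gs →
      pvRel ((PySem.List.enumerate ld s).foldl (pvRowA skd) cache) ((PySem.List.enumerate ld s).foldl (pvRowB skd) gs) ∧
      pvBound (s + ld.length) ((PySem.List.enumerate ld s).foldl (pvRowB skd) gs) := by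
  intro ld
  induction ld with
  | nil =>
    intro s cache gs h1 hb
    exact ⟨h1, pvBound_mono (by simp) hb⟩
  | cons row ld ih =>
    intro s cache gs h1 hb
    rw [PySem.List.enumerate_cons]
    simp only [List.foldl_cons]
    rcases hlk : (PySem.Dict.mk skd).get? (PySem.List.pyGetD row 0 0) with _ | vsd
    · have hA : pvRowA skd cache (s, row) = cache := by simp [pvRowA, hlk]
      have hB : pvRowB skd gs (s, row) = gs := by simp [pvRowB, hlk]
      rw [hA, hB]
      obtain ⟨h1', hb'⟩ := ih (s + 1) cache gs h1 (pvBound_mono (by omega) hb)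
      exact ⟨h1', pvBound_mono (by simp only [List.length_cons]; push_cast; omega) hb'⟩
    · have hmem : (vsd.map Prod.fst).Nodup := by
        have h : (PySem.List.pyGetD row 0 0, vsd) ∈ (PySem.Dict.mk skd).items :=
          PySem.Dict.mem_items_of_get?_eq_some _ hlk
        exact hpre _ h
      have hA : pvRowA skd cache (s, row) = vsd.foldl (pvCacheStepA s) cache := by simp [pvRowA, hlk]
      have hB : pvRowB skd gs (s, row) = vsd.foldl (pvGroupStepB s) gs := by simp [pvRowB, hlk]
      rw [hA, hB]
      obtain ⟨h1', hb'⟩ := pv_inner s vsd cache gs hmem h1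
        (fun g _ lst hg q hq => by have := hb g lst hg q hq; omega)
        (pvBound_mono (by omega) hb)
      obtain ⟨h1'', hb''⟩ := ih (s + 1) _ _ h1' hb'
      exact ⟨h1'', pvBound_mono (by simp only [List.length_cons]; push_cast; omega) hb''⟩

-- the common shape of A's second phase, indexed by a group→list function
def pvSpec (f : Int → List (Int × List Int)) : List Int → Int → List Int × List Int × List Int
  | [], _ => ([], [], [])
  | g :: L, cnt =>
    let r := pvSpec f L (cnt + ((f g).length : Int))
    (cnt :: r.1, (f g).map Prod.fst ++ r.2.1, (f g).flatMap (fun p => p.2 ++ [0, 0, 0]) ++ r.2.2)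

lemma pv_emit (lst : List (Int × List Int)) :
    ∀ (offs ids voffs : List Int) (cnt : Int),
      lst.foldl pvEmitA (offs, ids, voffs, cnt) =
        (offs, ids ++ lst.map Prod.fst, voffs ++ lst.flatMap (fun p => p.2 ++ [0, 0, 0]), cnt + (lst.length : Int)) := by
  induction lst with
  | nil => intro offs ids voffs cnt; simp
  | cons p lst ih =>
    intro offs ids voffs cnt
    simp only [List.foldl_cons, pvEmitA, ih]
    refine Prod.ext rfl (Prod.ext ?_ (Prod.ext ?_ ?_)) <;> simp
    ring

lemma pv_phase2 (cache : PySem.Dict Int (PySem.Dict Int (List Int))) (gs : PySem.Dict Int (List (Int × List Int)))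
    (hrel : pvRel cache gs) :
    ∀ (L : List Int) (offs ids voffs : List Int) (cnt : Int),
      L.foldl (pvGroupA cache) (offs, ids, voffs, cnt) =
        (offs ++ (pvSpec (fun g => gs.getD g []) L cnt).1,
         ids ++ (pvSpec (fun g => gs.getD g []) L cnt).2.1,
         voffs ++ (pvSpec (fun g => gs.getD g []) L cnt).2.2,
         cnt + (L.map (fun g => ((gs.getD g []).length : Int))).sum) := by
  intro L
  induction L with
  | nil => intro offs ids voffs cnt; simp [pvSpec]
  | cons g L ih =>
    intro offs ids voffs cnt
    simp only [List.foldl_cons]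
    have hif : (if cnt ≠ 0 then cnt else 0) = cnt := by
      by_cases h : cnt = 0 <;> simp [h]
    rcases hc : gs.get? g with _ | lst
    · have hfg : gs.getD g [] = [] := by
        rw [PySem.Dict.getD_eq_get?_getD, hc]; rfl
      have hstep : pvGroupA cache (offs, ids, voffs, cnt) g = (offs ++ [cnt], ids, voffs, cnt) := by
        simp [pvGroupA, hrel g, hc, hif]
      rw [hstep, ih]
      simp [pvSpec, hfg]
    · have hfg : gs.getD g [] = lst := by
        rw [PySem.Dict.getD_eq_get?_getD, hc]; rfl
      by_cases hl : lst = []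
      · have hstep : pvGroupA cache (offs, ids, voffs, cnt) g = (offs ++ [cnt], ids, voffs, cnt) := by
          simp [pvGroupA, hrel g, hc, hif, hl, PySem.Dict.size]
        rw [hstep, ih]
        simp [pvSpec, hfg, hl]
      · have hsz : (PySem.Dict.mk lst).size ≠ 0 := by
          simp [PySem.Dict.size, List.length_eq_zero_iff, hl]
        have hstep : pvGroupA cache (offs, ids, voffs, cnt) g =
            lst.foldl pvEmitA (offs ++ [cnt], ids, voffs, cnt) := by
          simp [pvGroupA, hrel g, hc, hsz]
        rw [hstep, pv_emit, ih]
        simp only [pvSpec, hfg]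
        refine Prod.ext ?_ (Prod.ext ?_ (Prod.ext ?_ ?_))
        · simp [List.append_assoc]
        · simp [List.append_assoc]
        · simp [List.append_assoc]
        · simp only [List.map_cons, List.sum_cons, hfg]
          ring

lemma pvSpec_ids (f : Int → List (Int × List Int)) :
    ∀ (L : List Int) (cnt : Int), (pvSpec f L cnt).2.1 = L.flatMap (fun g => (f g).map Prod.fst) := by
  intro L; induction L with
  | nil => intro cnt; rfl
  | cons g L ih => intro cnt; simp [pvSpec, ih]

lemma pvSpec_packed (f : Int → List (Int × List Int)) :
    ∀ (L : List Int) (cnt : Int), (pvSpec f L cnt).2.2 = L.flatMap (fun g => (f g).flatMap (fun p => p.2 ++ [0, 0, 0])) := by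
  intro L; induction L with
  | nil => intro cnt; rfl
  | cons g L ih => intro cnt; simp [pvSpec, ih]

lemma pvSpec_offsets (f : Int → List (Int × List Int)) :
    ∀ (n : Nat) (a cnt : Int),
      (pvSpec f (PySem.List.pyRange a (a + n) 1) cnt).1 =
        (PySem.List.pyRange a (a + n) 1).map
          (fun g => cnt + ((PySem.List.pyRange a g 1).map (fun j => ((f j).length : Int))).sum) := by
  intro n
  induction n with
  | zero =>
    intro a cnt
    rw [PySem.List.pyRange_one_eq_nil (by simp)]
    rfl
  | succ n ih =>
    intro a cnt
    have hab : a < a + ((n + 1 : Nat) : Int) := by push_cast; omega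
    rw [PySem.List.pyRange_one_cons hab]
    have harr : a + ((n + 1 : Nat) : Int) = (a + 1) + (n : Int) := by push_cast; ring
    rw [harr]
    simp only [pvSpec, List.map_cons]
    refine congrArg₂ _ ?_ ?_
    · rw [PySem.List.pyRange_one_eq_nil (le_refl a)]
      simp
    · rw [ih (a + 1) (cnt + ((f a).length : Int))]
      refine List.map_congr_left ?_
      intro g hg
      have hga : a + 1 ≤ g := (PySem.List.mem_pyRange_one.mp hg).1
      rw [PySem.List.pyRange_one_cons (by omega : a < g)]
      simp only [List.map_cons, List.sum_cons]
      ring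

-- ===== VERDICT (by name: the statement is the Claim_ definition above) =====
theorem extract_shapekey_data_spec : Claim_equal_extract_shapekey_data := by
  intro ld sks skd _hdom hpre
  obtain ⟨_hrows, hnd⟩ := hpre
  unfold Spec_extract_shapekey_data
  have hrel0 : pvRel PySem.Dict.empty PySem.Dict.empty := by
    intro g; rw [PySem.Dict.get?_empty, PySem.Dict.get?_empty]; rfl
  have hempty0 : ∀ (g : Int) (lst : List (Int × List Int)),
      (PySem.Dict.empty : PySem.Dict Int (List (Int × List Int))).get? g = some lst → lst = [] := by
    intro g lst h; rw [PySem.Dict.get?_empty] at h; cases h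
  obtain ⟨hrelI, hemptyI⟩ := pv_init sks _ _ hrel0 hempty0
  have hbound0 : pvBound 0 (sks.foldl (fun d p => d.insert p.1 ([] : List (Int × List Int))) PySem.Dict.empty) := by
    intro g lst hg q hq
    rw [hemptyI g lst hg] at hq
    cases hq
  obtain ⟨hrel, _⟩ := pv_outer skd hnd ld 0 _ _ hrelI hbound0
  simp only [extract_shapekey_data, extract_shapekey_data_alt]
  rw [pv_phase2 _ _ hrel]
  refine Prod.ext ?_ (Prod.ext ?_ ?_)
  · -- offsets: A's running counter = prefix sums of the group sizes
    have hoff := pvSpec_offsets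
      (fun g => ((PySem.List.enumerate ld 0).foldl (pvRowB skd)
        (sks.foldl (fun d p => d.insert p.1 ([] : List (Int × List Int))) PySem.Dict.empty)).getD g []) 128 0 0
    norm_num at hoff ⊢
    rw [hoff]
    refine List.map_congr_left ?_
    intro g hg
    obtain ⟨hg0, hg128⟩ := PySem.List.mem_pyRange_one.mp hg
    rw [PySem.List.slice_to _ hg0, PySem.List.pyRange_one_append 0 g 128 hg0 (by omega), List.map_append,
        List.take_left' (by simp [PySem.List.length_pyRange_one])]
  · simp only [pvSpec_ids]
    rfl
  · simp only [pvSpec_packed]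
    rfl
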